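-- pv_equiv track=rewrite | github.com/Xposl/stock-filter-py | core/database/mysql_helper.py | _convert_params
-- ===== SOURCE A (Python) =====
-- from typing import Any, Optional, Union
--
-- def _convert_params(sql: str, params: Optional[Union[dict, tuple]]) -> tuple:
--     """
--     转换:name格式参数为MySQL格式
--
--     Args:
--         sql: SQL语句
--         params: 参数（字典或元组）
--
--     Returns:
--         (转换后的SQL, 转换后的参数)
--     """
--     if not params:
--         return sql, params
--
--     if isinstance(params, dict):
--         # 字典参数：将:name转换为%(name)s
--         converted_sql = sql
--         # 按参数名长度倒序排列，避免短参数名匹配长参数名的问题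
--         sorted_keys = sorted(params.keys(), key=len, reverse=True)
--         for key in sorted_keys:
--             converted_sql = converted_sql.replace(f":{key}", f"%({key})s")
--         return converted_sql, params
--     else:
--         # 元组参数：保持原样
--         return sql, params
-- ===== SOURCE B (Python) =====
-- from typing import Any, Optional, Union
--
--
-- def _convert_params(sql: str, params: Optional[Union[dict, tuple]]) -> tuple:
--     """Single left-to-right scan: at each ':' emit the longest matching key as %(key)s."""
--     if not params:
--         return sql, params
--
--     if isinstance(params, dict):
--         keys = sorted(params.keys(), key=len, reverse=True)
--         out = []
--         i = 0
--         n = len(sql)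
--         while i < n:
--             if sql[i] == ":":
--                 for key in keys:
--                     if sql.startswith(key, i + 1):
--                         out.append("%(" + key + ")s")
--                         i += 1 + len(key)
--                         break
--                 else:
--                     out.append(sql[i])
--                     i += 1
--             else:
--                 out.append(sql[i])
--                 i += 1
--         return "".join(out), params
--     else:
--         return sql, params
-- ===== Notes on version B (the rewrite author's own statement) =====
-- stated objective: faster
-- what changed: A runs one whole-string str.replace pass per key (longest key first); B makes a single left-to-right scan of sql, emitting %(key)s for the first (longest) key matching at each ':'.
import Mathlib
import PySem

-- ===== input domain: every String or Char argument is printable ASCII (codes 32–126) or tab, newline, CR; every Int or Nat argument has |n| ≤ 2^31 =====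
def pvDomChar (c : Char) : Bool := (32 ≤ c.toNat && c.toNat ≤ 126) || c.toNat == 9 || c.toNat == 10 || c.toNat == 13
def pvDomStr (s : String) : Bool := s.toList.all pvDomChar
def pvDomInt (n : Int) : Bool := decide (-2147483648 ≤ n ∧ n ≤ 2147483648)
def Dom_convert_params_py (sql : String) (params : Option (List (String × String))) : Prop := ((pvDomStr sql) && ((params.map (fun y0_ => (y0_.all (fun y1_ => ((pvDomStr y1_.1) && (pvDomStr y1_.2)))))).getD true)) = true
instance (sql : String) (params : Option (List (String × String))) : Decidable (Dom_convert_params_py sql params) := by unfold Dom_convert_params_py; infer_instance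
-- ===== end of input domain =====

-- B replaces A's one whole-string str.replace pass per key by a single left-to-right scan of
-- sql that matches the sorted keys at each ':'.

-- ===== PORT A =====
-- A: `if not params` guards; dict case: for each key, longest first, replace ":key" by "%(key)s".
def convert_params_py (sql : String) (params : Option (List (String × String))) : String × (Option (List (String × String))) :=
  match params with
  | none => (sql, none)                                    -- `if not params` (None is falsy)
  | some l =>
      if l.isEmpty then (sql, some l)                      -- `if not params` (empty dict is falsy)
      else
        -- sorted(params.keys(), key=len, reverse=True); dict keys = first occurrences in order
        let sortedKeys := PySem.List.sorted (PySem.List.dedup (l.map Prod.fst)) (fun k => k.toList.length) true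
        let converted := sortedKeys.foldl
          (fun s k => PySem.Str.replace s (String.ofList (':' :: k.toList))
                        (String.ofList ('%' :: '(' :: (k.toList ++ [')', 's'])))) sql
        (converted, some l)

-- ===== PORT B =====
-- "%(" + key + ")s"
def pvFmt (k : List Char) : List Char := '%' :: '(' :: (k ++ [')', 's'])

-- B's while loop: copy chars; at ':' try the keys in order, emit "%(key)s" for the first match.
def pvScan (ks : List (List Char)) : List Char → List Char
  | [] => []
  | c :: t =>
      if c = ':' then
        match ks.find? (fun k => k.isPrefixOf t) with
        | some k => pvFmt k ++ pvScan ks (t.drop k.length)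
        | none => c :: pvScan ks t
      else c :: pvScan ks t
termination_by s => s.length
decreasing_by
  · simp
  · simp
  · simp

def convert_params_py_alt (sql : String) (params : Option (List (String × String))) : String × (Option (List (String × String))) :=
  match params with
  | none => (sql, none)
  | some l =>
      if l.isEmpty then (sql, some l)
      else
        let sortedKeys := PySem.List.sorted (PySem.List.dedup (l.map Prod.fst)) (fun k => k.toList.length) true
        (String.ofList (pvScan (sortedKeys.map String.toList) sql.toList), some l)

-- ===== PRECONDITION & SPEC =====
-- Pre_ excludes dicts with a key containing ':' or '%': there A's successive replacement passes
-- can re-match inside text produced by an earlier replacement, an accidental order-dependent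
-- result no caller would specify (SQL parameter names contain neither character).
def Pre_convert_params_py (sql : String) (params : Option (List (String × String))) : Prop :=
  ∀ p ∈ params.getD [], ':' ∉ p.1.toList ∧ '%' ∉ p.1.toList
instance (sql : String) (params : Option (List (String × String))) : Decidable (Pre_convert_params_py sql params) := by unfold Pre_convert_params_py; infer_instance

def pvWitness_convert_params_py : String × (Option (List (String × String))) :=
  ("SELECT * FROM t WHERE id = :id AND name = :name", some [("id", "1"), ("name", "x")])

def Spec_convert_params_py (sql : String) (params : Option (List (String × String))) (out : String × (Option (List (String × String)))) : Prop := out = convert_params_py_alt sql params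
instance (sql : String) (params : Option (List (String × String))) (out : String × (Option (List (String × String)))) : Decidable (Spec_convert_params_py sql params out) := by unfold Spec_convert_params_py; infer_instance

-- ===== CLAIM (what is proved, stated in full; the proofs are below) =====
def Claim_equal_convert_params_py : Prop := ∀ (sql : String) (params : Option (List (String × String))), Dom_convert_params_py sql params → Pre_convert_params_py sql params → Spec_convert_params_py sql params (convert_params_py sql params)

-- ===== LEMMAS AND PROOFS =====

-- A's str.replace for pattern ":k" and replacement "%(k)s", as a plain structural scan.
def pvRep (k : List Char) : List Char → List Char
  | [] => []
  | c :: t =>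
      if (':' :: k).isPrefixOf (c :: t) then pvFmt k ++ pvRep k (t.drop k.length)
      else c :: pvRep k t
termination_by s => s.length
decreasing_by
  · simp
  · simp

-- PySem.Chars.replace.go with enough fuel computes pvRep.
theorem pvGo_eq (k : List Char) : ∀ (fuel : Nat) (l acc : List Char), l.length ≤ fuel →
    PySem.Chars.replace.go (':' :: k) (pvFmt k) fuel l acc = acc.reverse ++ pvRep k l := by
  intro fuel
  induction fuel with
  | zero =>
    intro l acc h
    have : l = [] := by cases l <;> simp_all
    subst this
    rw [PySem.Chars.replace.go.eq_def]
    simp [pvRep]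
  | succ f ih =>
    intro l acc h
    cases l with
    | nil => rw [PySem.Chars.replace.go.eq_def]; simp [pvRep]
    | cons c t =>
      rw [PySem.Chars.replace.go.eq_def]
      simp only []
      by_cases hp : (':' :: k).isPrefixOf (c :: t)
      · rw [if_pos hp, ih _ _ (by simp at h ⊢; omega)]
        rw [pvRep, if_pos hp]
        simp
      · rw [if_neg hp, ih _ _ (by simp at h ⊢; omega)]
        rw [pvRep, if_neg hp]
        simp

theorem pvReplace_eq (k s : List Char) :
    PySem.Chars.replace s (':' :: k) (pvFmt k) = pvRep k s := by
  rw [PySem.Chars.replace]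
  simp [pvGo_eq k s.length s [] (Nat.le_refl _)]

-- the scan distributes over a colon-free left part (no match can start inside it).
theorem pvScan_append_nocolon (ks : List (List Char)) (a b : List Char) (h : ':' ∉ a) :
    pvScan ks (a ++ b) = a ++ pvScan ks b := by
  induction a with
  | nil => simp
  | cons c a' ih =>
    have hc : c ≠ ':' := by intro e; exact h (by simp [e])
    rw [List.cons_append, pvScan, if_neg hc, ih (fun m => h (by simp [m]))]
    simp

theorem pvFmt_nocolon (k : List Char) (h : ':' ∉ k) : ':' ∉ pvFmt k := by
  simp [pvFmt, h]

-- replacing leaves a colon-free prefix of the text untouched.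
theorem pvRep_append_prefix (k0 : List Char) : ∀ (a t : List Char), ':' ∉ a → a <+: t →
    pvRep k0 t = a ++ pvRep k0 (t.drop a.length) := by
  intro a
  induction a with
  | nil => simp
  | cons c a' ih =>
    intro t ha hpre
    obtain ⟨r, rfl⟩ := hpre
    have hc : c ≠ ':' := fun e => ha (by simp [e])
    rw [List.cons_append, pvRep, if_neg (by simp [List.isPrefixOf_cons₂]; intro e; exact absurd e.symm hc)]
    have ha' : ':' ∉ a' := fun m => ha (by simp [m])
    rw [ih (a' ++ r) ha' ⟨r, rfl⟩]
    simp

-- a colon/percent-free key matches the replaced text iff it matches the original text.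
theorem pvPrefix_iff (k0 : List Char) : ∀ (t k' : List Char), ':' ∉ k' → '%' ∉ k' →
    k'.isPrefixOf (pvRep k0 t) = k'.isPrefixOf t := by
  intro t
  induction t with
  | nil => intro k' _ _; rw [pvRep]
  | cons c t₂ ih =>
    intro k' hc hp
    by_cases hpre : (':' :: k0).isPrefixOf (c :: t₂)
    · rw [pvRep, if_pos hpre]
      cases k' with
      | nil => simp
      | cons d k₂ =>
        have hdp : d ≠ '%' := fun e => hp (by simp [e])
        have hdc : d ≠ ':' := fun e => hc (by simp [e])
        have hcc : c = ':' := by simp [List.isPrefixOf_cons₂] at hpre; exact hpre.1.symm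
        have h1 : (d == '%') = false := by simp [hdp]
        have h2 : (d == ':') = false := by simp [hdc]
        rw [pvFmt]
        simp [List.isPrefixOf_cons₂, hcc, h1, h2]
    · rw [pvRep, if_neg hpre]
      cases k' with
      | nil => simp
      | cons d k₂ =>
        have hc₂ : ':' ∉ k₂ := fun m => hc (by simp [m])
        have hp₂ : '%' ∉ k₂ := fun m => hp (by simp [m])
        simp only [List.isPrefixOf_cons₂]
        rw [ih k₂ hc₂ hp₂]

theorem pvFind?_congr (l : List (List Char)) (p q : List Char → Bool) (h : ∀ x ∈ l, p x = q x) :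
    l.find? p = l.find? q := by
  induction l with
  | nil => rfl
  | cons a t ih => simp [List.find?, h a (by simp)]; split <;> simp_all

-- the key step: scanning with the remaining keys after replacing the first key
-- equals scanning with all the keys.
theorem pvStep (k0 : List Char) (rest : List (List Char)) (hk0 : ':' ∉ k0)
    (hrest : ∀ k ∈ rest, ':' ∉ k ∧ '%' ∉ k) :
    ∀ (n : Nat) (s : List Char), s.length ≤ n → pvScan rest (pvRep k0 s) = pvScan (k0 :: rest) s := by
  intro n
  induction n with
  | zero =>
    intro s h
    have : s = [] := by cases s <;> simp_all
    subst this; simp [pvRep, pvScan]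
  | succ n ih =>
    intro s h
    cases s with
    | nil => simp [pvRep, pvScan]
    | cons c t =>
      by_cases hpre : (':' :: k0).isPrefixOf (c :: t)
      · have hcc : c = ':' := by simp [List.isPrefixOf_cons₂] at hpre; exact hpre.1.symm
        have hk0t : k0.isPrefixOf t := by
          apply List.isPrefixOf_iff_prefix.mpr
          simp [List.isPrefixOf_cons₂] at hpre; exact hpre.2
        rw [pvRep, if_pos hpre,
            pvScan_append_nocolon rest _ _ (pvFmt_nocolon k0 hk0),
            ih _ (by simp at h ⊢; omega)]
        conv_rhs => rw [pvScan]
        rw [if_pos hcc]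
        simp [List.find?, hk0t]
      · rw [pvRep, if_neg hpre]
        by_cases hcc : c = ':'
        · have hk0t : k0.isPrefixOf t = false := by
            by_contra hb
            rw [Bool.not_eq_false] at hb
            exact hpre (by simp [List.isPrefixOf_cons₂]
                           exact ⟨hcc.symm, List.isPrefixOf_iff_prefix.mp hb⟩)
          have hfind : rest.find? (fun k => k.isPrefixOf (pvRep k0 t)) = rest.find? (fun k => k.isPrefixOf t) := by
            apply pvFind?_congr
            intro k hk
            exact pvPrefix_iff k0 t k (hrest k hk).1 (hrest k hk).2
          rw [pvScan, if_pos hcc, hfind]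
          conv_rhs => rw [pvScan]
          rw [if_pos hcc]
          simp only [List.find?, hk0t]
          cases hf : rest.find? (fun k => k.isPrefixOf t) with
          | none => simp [ih _ (by simp at h ⊢; omega)]
          | some k' =>
            have hk'mem : k' ∈ rest := List.mem_of_find?_eq_some hf
            have hk'pre : k'.isPrefixOf t := by
              have := List.find?_some hf; simpa using this
            have hnc : ':' ∉ k' := (hrest k' hk'mem).1
            simp only []
            rw [pvRep_append_prefix k0 k' t hnc (List.isPrefixOf_iff_prefix.mp hk'pre)]
            rw [List.drop_left]
            rw [ih _ (by have := List.IsPrefix.length_le (List.isPrefixOf_iff_prefix.mp hk'pre); simp at h ⊢; omega)]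
        · rw [pvScan, if_neg hcc]
          conv_rhs => rw [pvScan]
          rw [if_neg hcc, ih _ (by simp at h ⊢; omega)]

-- A's whole fold of replaces equals B's single scan (keys colon/percent-free; same key order).
theorem pvMain (ks : List (List Char)) (h : ∀ k ∈ ks, ':' ∉ k ∧ '%' ∉ k) :
    ∀ s, ks.foldl (fun s k => pvRep k s) s = pvScan ks s := by
  induction ks with
  | nil => intro s; induction s with
    | nil => simp [pvScan]
    | cons c t iht =>
      simp only [List.foldl_nil] at *
      rw [pvScan]
      by_cases hc : c = ':'
      · rw [if_pos hc]; simp [List.find?, ← iht]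
      · rw [if_neg hc, ← iht]
  | cons k0 rest ih =>
    intro s
    rw [List.foldl_cons, ih (fun k hk => h k (by simp [hk])),
        pvStep k0 rest (h k0 (by simp)).1 (fun k hk => h k (by simp [hk])) s.length s (Nat.le_refl _)]

-- A's fold over Strings, moved to List Char.
theorem pvFold_toList (keys : List String) : ∀ s : String,
    (keys.foldl (fun s k => PySem.Str.replace s (String.ofList (':' :: k.toList))
        (String.ofList ('%' :: '(' :: (k.toList ++ [')', 's'])))) s).toList
    = (keys.map String.toList).foldl (fun s k => pvRep k s) s.toList := by
  induction keys with
  | nil => intro s; simp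
  | cons k ks ih =>
    intro s
    rw [List.foldl_cons, List.map_cons, List.foldl_cons, ih]
    have hrep : (PySem.Str.replace s (String.ofList (':' :: k.toList))
        (String.ofList ('%' :: '(' :: (k.toList ++ [')', 's'])))).toList = pvRep k.toList s.toList := by
      rw [PySem.Str.toList_replace]
      have hre := pvReplace_eq k.toList s.toList
      rw [pvFmt] at hre
      simpa using hre
    rw [hrep]

-- ===== VERDICT (by name: the statement is the Claim_ definition above) =====
set_option maxHeartbeats 1000000 in
theorem convert_params_py_spec : Claim_equal_convert_params_py := by
  intro sql params _hdom hpre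
  unfold Spec_convert_params_py
  cases params with
  | none => rfl
  | some l =>
    by_cases hl : l.isEmpty
    · simp only [convert_params_py, convert_params_py_alt, hl, if_true]
    · simp only [convert_params_py, convert_params_py_alt, hl, Bool.false_eq_true, if_false]
      have hkeys : ∀ k ∈ (PySem.List.sorted (PySem.List.dedup (l.map Prod.fst)) (fun k => k.toList.length) true).map String.toList,
          ':' ∉ k ∧ '%' ∉ k := by
        intro k hk
        simp only [List.mem_map] at hk
        obtain ⟨a, ha, rfl⟩ := hk
        rw [PySem.List.mem_sorted] at ha
        rw [PySem.List.mem_dedup] at ha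
        simp only [List.mem_map] at ha
        obtain ⟨p, hp, rfl⟩ := ha
        exact hpre p (by simpa using hp)
      congr 1
      have htl := pvFold_toList (PySem.List.sorted (PySem.List.dedup (l.map Prod.fst)) (fun k => k.toList.length) true) sql
      rw [pvMain _ hkeys sql.toList] at htl
      rw [← htl]
      simp
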